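-- pv_equiv track=rewrite | github.com/Knight-zhang/contrast_rules | fpgrowth/car_fpgrowth.py | min_for_dic_value
-- ===== SOURCE A (Python) =====
-- def min_for_dic_value(dic_values_array, possible_keys_array):
--     """
--     For a given array of dictionaries of the same structure return a dictionary that has
--     minimum values of all keys
--     :param dic_values_array:
--     :param possible_keys_array: keys of dictionaries
--     :return:
--     """
--     # initialize with empty array
--     all_dic = {}
--     for key in possible_keys_array:
--         all_dic[key] = []
--
--     # loop thorough dictionaries to gather all values for one key into array
--     for dic in dic_values_array:
--         for key in possible_keys_array:
--             all_dic[key].append(dic[key])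
--
--     # now min_dic for every key has its minimum value
--     min_dic = {}
--     for key in possible_keys_array:
--         min_dic[key] = min(all_dic[key])
--
--     return min_dic
-- ===== SOURCE B (Python) =====
-- def min_for_dic_value(dic_values_array, possible_keys_array):
--     """
--     Single streaming pass: keep a running per-key minimum instead of
--     materialising all values per key and reducing afterwards.
--     """
--     min_dic = {}
--     for dic in dic_values_array:
--         for key in possible_keys_array:
--             v = dic[key]
--             if key not in min_dic or v < min_dic[key]:
--                 min_dic[key] = v
--     return min_dic
-- ===== Notes on version B (the rewrite author's own statement) =====
-- stated objective: simpler
-- what changed: Replaces A's three phases (initialise per-key lists, gather every value into them, then reduce each list with min) by one streaming fold that keeps a running per-key minimum, never materialising the value lists.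
import Mathlib
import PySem

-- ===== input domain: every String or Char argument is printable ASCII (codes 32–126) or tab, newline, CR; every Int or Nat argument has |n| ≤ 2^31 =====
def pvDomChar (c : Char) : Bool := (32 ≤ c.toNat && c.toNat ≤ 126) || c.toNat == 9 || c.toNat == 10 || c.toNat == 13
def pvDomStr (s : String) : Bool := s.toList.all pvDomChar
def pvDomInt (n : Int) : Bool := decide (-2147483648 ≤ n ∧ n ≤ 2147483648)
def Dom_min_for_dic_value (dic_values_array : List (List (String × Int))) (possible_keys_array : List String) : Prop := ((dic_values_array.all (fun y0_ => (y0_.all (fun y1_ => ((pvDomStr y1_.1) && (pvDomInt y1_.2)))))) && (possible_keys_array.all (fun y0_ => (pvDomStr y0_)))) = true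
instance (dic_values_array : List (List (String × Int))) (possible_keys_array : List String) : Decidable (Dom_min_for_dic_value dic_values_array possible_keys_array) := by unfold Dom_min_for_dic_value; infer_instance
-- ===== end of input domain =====

-- B replaces A's three phases (build per-key value lists, then reduce each with min) by a single
-- streaming fold keeping a running per-key minimum; objective: simpler (same return value on Pre_).

-- shared accessor: Python's `dic[key]` on the dict argument; a missing key is a KeyError,
-- excluded by Pre_, so the default 0 is never the value used on admitted inputs
def pvDicGet (dic : List (String × Int)) (key : String) : Int :=
  PySem.Dict.getD (PySem.Dict.mk dic) key 0

-- ===== PORT A =====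
def min_for_dic_value (dic_values_array : List (List (String × Int))) (possible_keys_array : List String) : List (String × Int) :=
  -- all_dic = {}; for key in possible_keys_array: all_dic[key] = []
  let allDic0 : PySem.Dict String (List Int) :=
    possible_keys_array.foldl (fun d key => d.insert key []) PySem.Dict.empty
  -- for dic in dic_values_array: for key in possible_keys_array: all_dic[key].append(dic[key])
  let allDic : PySem.Dict String (List Int) :=
    dic_values_array.foldl (fun d dic =>
      possible_keys_array.foldl (fun d key =>
        d.modify key [] (fun l => l ++ [pvDicGet dic key])) d) allDic0
  -- min_dic = {}; for key: min_dic[key] = min(all_dic[key])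
  -- (min([]) is a ValueError, excluded by Pre_, so the .getD 0 default is never used there)
  let minDic : PySem.Dict String Int :=
    possible_keys_array.foldl (fun d key =>
      d.insert key ((PySem.List.min? (allDic.getD key []) (fun x => x)).getD 0)) PySem.Dict.empty
  minDic.items

-- ===== PORT B =====
-- loop body of B: v = dic[key]; if key not in min_dic or v < min_dic[key]: min_dic[key] = v
def pvBStep (dic : List (String × Int)) (md : PySem.Dict String Int) (key : String) : PySem.Dict String Int :=
  let v := pvDicGet dic key
  match md.get? key with
  | none => md.insert key v
  | some m => if v < m then md.insert key v else md

def min_for_dic_value_alt (dic_values_array : List (List (String × Int))) (possible_keys_array : List String) : List (String × Int) :=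
  (dic_values_array.foldl (fun md dic => possible_keys_array.foldl (pvBStep dic) md)
    (PySem.Dict.empty : PySem.Dict String Int)).items

-- ===== PRECONDITION & SPEC =====
-- Pre_ excludes exactly the inputs where A raises: an empty dict array with a non-empty key list
-- (min([]) is a ValueError) and a dict lacking one of the keys (KeyError).
def Pre_min_for_dic_value (dic_values_array : List (List (String × Int))) (possible_keys_array : List String) : Prop :=
  (dic_values_array = [] → possible_keys_array = []) ∧
  ∀ dic ∈ dic_values_array, ∀ key ∈ possible_keys_array, key ∈ dic.map Prod.fst
instance (dic_values_array : List (List (String × Int))) (possible_keys_array : List String) : Decidable (Pre_min_for_dic_value dic_values_array possible_keys_array) := by unfold Pre_min_for_dic_value; infer_instance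

def pvWitness_min_for_dic_value : (List (List (String × Int))) × List String :=
  ([[("a", 3), ("b", 5)], [("a", 1), ("b", 9)]], ["a", "b"])

def Spec_min_for_dic_value (dic_values_array : List (List (String × Int))) (possible_keys_array : List String) (out : List (String × Int)) : Prop := out = min_for_dic_value_alt dic_values_array possible_keys_array
instance (dic_values_array : List (List (String × Int))) (possible_keys_array : List String) (out : List (String × Int)) : Decidable (Spec_min_for_dic_value dic_values_array possible_keys_array out) := by unfold Spec_min_for_dic_value; infer_instance

-- ===== CLAIM (what is proved, stated in full; the proofs are below) =====
def Claim_equal_min_for_dic_value : Prop := ∀ (dic_values_array : List (List (String × Int))) (possible_keys_array : List String), Dom_min_for_dic_value dic_values_array possible_keys_array → Pre_min_for_dic_value dic_values_array possible_keys_array → Spec_min_for_dic_value dic_values_array possible_keys_array (min_for_dic_value dic_values_array possible_keys_array)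


-- ===== LEMMAS AND PROOFS =====

-- running minimum on an optional accumulator, as B's branch computes it
def pvOMin (o : Option Int) (v : Int) : Int :=
  match o with
  | none => v
  | some m => if v < m then v else m

lemma pvOMin_idem (o : Option Int) (v : Int) : pvOMin (some (pvOMin o v)) v = pvOMin o v := by
  cases o with
  | none => simp [pvOMin]
  | some m => simp only [pvOMin]; split_ifs <;> omega

lemma pvOMin_some_min (m v : Int) : pvOMin (some m) v = min m v := by
  simp only [pvOMin]; split_ifs <;> omega

-- a fold of inserts whose values do not depend on the accumulator
lemma getD_insert_fold {ν : Type} (v : String → ν) (d0 : ν) :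
    ∀ (ks : List String) (e : PySem.Dict String ν) (k : String),
      (ks.foldl (fun d key => d.insert key (v key)) e).getD k d0 =
        if k ∈ ks then v k else e.getD k d0 := by
  intro ks
  induction ks with
  | nil => simp
  | cons k0 ks ih =>
      intro e k
      simp only [List.foldl_cons, ih, List.mem_cons]
      by_cases hks : k ∈ ks
      · simp [hks]
      · by_cases hk0 : k = k0 <;> simp [hks, hk0, PySem.Dict.getD_insert]

-- A's gather loop, inner fold over the keys of one dict
lemma gather_inner (dic : List (String × Int)) :
    ∀ (ks : List String) (d : PySem.Dict String (List Int)) (k : String),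
      (ks.foldl (fun d key => d.modify key [] (fun l => l ++ [pvDicGet dic key])) d).getD k [] =
        d.getD k [] ++ List.replicate (ks.count k) (pvDicGet dic k) := by
  intro ks
  induction ks with
  | nil => simp
  | cons k0 ks ih =>
      intro d k
      simp only [List.foldl_cons, ih, List.count_cons]
      by_cases hk0 : k0 = k
      · subst hk0
        simp [PySem.Dict.getD_modify_self, List.replicate_succ]
      · have : (k0 == k) = false := by simp [hk0]
        simp [PySem.Dict.getD_modify_of_ne _ _ _ (Ne.symm hk0), this]

-- A's gather loop, outer fold over the dicts
lemma gather_outer (keys : List String) :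
    ∀ (dics : List (List (String × Int))) (d : PySem.Dict String (List Int)) (k : String),
      (dics.foldl (fun d dic =>
          keys.foldl (fun d key => d.modify key [] (fun l => l ++ [pvDicGet dic key])) d) d).getD k [] =
        d.getD k [] ++ dics.flatMap (fun dic => List.replicate (keys.count k) (pvDicGet dic k)) := by
  intro dics
  induction dics with
  | nil => simp
  | cons d0 dics ih =>
      intro d k
      simp [List.foldl_cons, ih, gather_inner, List.append_assoc]

lemma mem_gathered (keys : List String) (dics : List (List (String × Int))) (k : String)
    (hk : k ∈ keys) (x : Int) :
    (x ∈ dics.flatMap (fun dic => List.replicate (keys.count k) (pvDicGet dic k)) ↔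
      ∃ dic ∈ dics, x = pvDicGet dic k) := by
  have hc : keys.count k ≠ 0 := by
    simpa [List.count_pos_iff] using (List.count_pos_iff.mpr hk).ne'
  constructor
  · rintro hx
    rcases List.mem_flatMap.mp hx with ⟨dic, hdic, hx⟩
    exact ⟨dic, hdic, (List.eq_of_mem_replicate hx)⟩
  · rintro ⟨dic, hdic, rfl⟩
    exact List.mem_flatMap.mpr ⟨dic, hdic, List.mem_replicate.mpr ⟨hc, rfl⟩⟩

-- Python's min on two nonempty lists with the same elements agrees
lemma min?_congr_mem (L1 L2 : List Int) (h1 : L1 ≠ []) (h2 : L2 ≠ [])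
    (h : ∀ x, x ∈ L1 ↔ x ∈ L2) :
    PySem.List.min? L1 (fun x => x) = PySem.List.min? L2 (fun x => x) := by
  cases e1 : PySem.List.min? L1 (fun x => x) with
  | none => exact absurd ((PySem.List.min?_eq_none_iff L1 _).mp e1) h1
  | some m1 =>
      cases e2 : PySem.List.min? L2 (fun x => x) with
      | none => exact absurd ((PySem.List.min?_eq_none_iff L2 _).mp e2) h2
      | some m2 =>
          have hm1 : m1 ∈ L2 := (h m1).mp (PySem.List.min?_mem e1)
          have hm2 : m2 ∈ L1 := (h m2).mpr (PySem.List.min?_mem e2)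
          have h12 : m1 ≤ m2 := PySem.List.min?_isMin e1 m2 hm2
          have h21 : m2 ≤ m1 := PySem.List.min?_isMin e2 m1 hm1
          simp [le_antisymm h12 h21]

-- lookups through B's inner fold over the key list
lemma bstep_get? (dic : List (String × Int)) (md : PySem.Dict String Int) (key k : String) :
    (pvBStep dic md key).get? k =
      if k = key then some (pvOMin (md.get? key) (pvDicGet dic key)) else md.get? k := by
  unfold pvBStep
  cases e : md.get? key with
  | none => simp [pvOMin, PySem.Dict.get?_insert]
  | some m =>
      by_cases hv : pvDicGet dic key < m
      · simp [hv, pvOMin, PySem.Dict.get?_insert]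
      · by_cases hk : k = key <;> simp [hv, pvOMin, hk, e]

lemma binner_get? (dic : List (String × Int)) :
    ∀ (ks : List String) (md : PySem.Dict String Int) (k : String),
      (ks.foldl (pvBStep dic) md).get? k =
        if k ∈ ks then some (pvOMin (md.get? k) (pvDicGet dic k)) else md.get? k := by
  intro ks
  induction ks with
  | nil => simp
  | cons k0 ks ih =>
      intro md k
      simp only [List.foldl_cons, ih, bstep_get?, List.mem_cons]
      by_cases hk0 : k = k0
      · subst hk0
        by_cases hks : k ∈ ks <;> simp [hks, pvOMin_idem]
      · by_cases hks : k ∈ ks <;> simp [hks, hk0]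

lemma bouter_get? (keys : List String) :
    ∀ (dics : List (List (String × Int))) (md : PySem.Dict String Int) (k : String), k ∈ keys →
      (dics.foldl (fun md dic => keys.foldl (pvBStep dic) md) md).get? k =
        dics.foldl (fun o dic => some (pvOMin o (pvDicGet dic k))) (md.get? k) := by
  intro dics
  induction dics with
  | nil => simp
  | cons d0 dics ih =>
      intro md k hk
      simp [List.foldl_cons, ih _ k hk, binner_get?, hk]

-- the running-minimum fold is Python's min of the mapped list
lemma ofold_some (k : String) :
    ∀ (dics : List (List (String × Int))) (x : Int),
      dics.foldl (fun o dic => some (pvOMin o (pvDicGet dic k))) (some x) =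
        some (dics.foldl (fun m dic => min m (pvDicGet dic k)) x) := by
  intro dics
  induction dics with
  | nil => simp
  | cons d0 dics ih => intro x; simp [List.foldl_cons, pvOMin_some_min, ih]

lemma ofold_eq_min? (k : String) (d0 : List (String × Int)) (dics : List (List (String × Int))) :
    (d0 :: dics).foldl (fun o dic => some (pvOMin o (pvDicGet dic k))) none =
      PySem.List.min? ((d0 :: dics).map (fun dic => pvDicGet dic k)) (fun x => x) := by
  rw [List.map_cons, PySem.List.min?_id_cons, List.foldl_cons, List.foldl_map]
  exact ofold_some k dics (pvDicGet d0 k)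

-- keys through B's folds
lemma binner_keys (dic : List (String × Int)) :
    ∀ (ks : List String) (md : PySem.Dict String Int),
      (ks.foldl (pvBStep dic) md).keys = PySem.Set.update md.keys ks := by
  intro ks
  induction ks with
  | nil => simp [PySem.Set.update]
  | cons k0 ks ih =>
      intro md
      rw [List.foldl_cons, ih, PySem.Set.update_cons]
      congr 1
      unfold pvBStep
      cases e : md.get? k0 with
      | none =>
          have hnc : md.contains k0 = false := by
            rw [PySem.Dict.contains_eq_isSome_get?, e]; rfl
          have hnm : k0 ∉ md.keys := fun hm => by
            simp [(PySem.Dict.contains_iff_mem_keys md k0).mpr hm] at hnc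
          simp [PySem.Dict.keys_insert_of_not_contains md _ hnc, PySem.Set.add_of_not_mem hnm]
      | some m =>
          have hc : md.contains k0 = true := by
            rw [PySem.Dict.contains_eq_isSome_get?, e]; rfl
          have hm : k0 ∈ md.keys := (PySem.Dict.contains_iff_mem_keys md k0).mp hc
          by_cases hv : pvDicGet dic k0 < m
          · simp [hv, PySem.Dict.keys_insert_of_contains md _ hc, PySem.Set.add_of_mem hm]
          · simp [hv, PySem.Set.add_of_mem hm]

lemma set_update_of_subset (s : PySem.Set String) :
    ∀ (ks : List String), (∀ x ∈ ks, x ∈ s) → PySem.Set.update s ks = s := by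
  intro ks
  induction ks generalizing s with
  | nil => intro _; rfl
  | cons k0 ks ih =>
      intro h
      rw [PySem.Set.update_cons, PySem.Set.add_of_mem (h k0 (by simp))]
      exact ih s (fun x hx => h x (by simp [hx]))

lemma bouter_keys_preserve (keys : List String) :
    ∀ (dics : List (List (String × Int))) (md : PySem.Dict String Int),
      (∀ x ∈ keys, x ∈ md.keys) →
      (dics.foldl (fun md dic => keys.foldl (pvBStep dic) md) md).keys = md.keys := by
  intro dics
  induction dics with
  | nil => intro md _; rfl
  | cons d0 dics ih =>
      intro md h
      rw [List.foldl_cons]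
      have hk : (keys.foldl (pvBStep d0) md).keys = md.keys := by
        rw [binner_keys, set_update_of_subset _ _ h]
      rw [ih _ (by rw [hk]; exact h), hk]

-- the two ports, re-stated through named dictionaries (definitional: both `rfl`)
def pvGatherD (dics : List (List (String × Int))) (keys : List String) : PySem.Dict String (List Int) :=
  dics.foldl (fun d dic =>
      keys.foldl (fun d key => d.modify key [] (fun l => l ++ [pvDicGet dic key])) d)
    (keys.foldl (fun d key => d.insert key []) PySem.Dict.empty)

def pvADict (dics : List (List (String × Int))) (keys : List String) : PySem.Dict String Int :=
  keys.foldl (fun d key =>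
    d.insert key ((PySem.List.min? ((pvGatherD dics keys).getD key []) (fun x => x)).getD 0)) PySem.Dict.empty

def pvBDict (dics : List (List (String × Int))) (keys : List String) : PySem.Dict String Int :=
  dics.foldl (fun md dic => keys.foldl (pvBStep dic) md) PySem.Dict.empty

lemma A_eq (dics : List (List (String × Int))) (keys : List String) :
    min_for_dic_value dics keys = (pvADict dics keys).items := rfl

lemma B_eq (dics : List (List (String × Int))) (keys : List String) :
    min_for_dic_value_alt dics keys = (pvBDict dics keys).items := rfl

lemma gatherD_getD (dics : List (List (String × Int))) (keys : List String) (k : String) :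
    (pvGatherD dics keys).getD k [] =
      dics.flatMap (fun dic => List.replicate (keys.count k) (pvDicGet dic k)) := by
  unfold pvGatherD
  rw [gather_outer keys dics _ k, getD_insert_fold (fun _ => ([] : List Int)) [] keys _ k]
  simp [PySem.Dict.getD_empty]

lemma ADict_getD (dics : List (List (String × Int))) (keys : List String) (k : String)
    (hk : k ∈ keys) :
    (pvADict dics keys).getD k 0 =
      (PySem.List.min? ((pvGatherD dics keys).getD k []) (fun x => x)).getD 0 := by
  unfold pvADict
  rw [getD_insert_fold]
  simp [hk]

lemma BDict_getD (d0 : List (String × Int)) (rest : List (List (String × Int)))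
    (keys : List String) (k : String) (hk : k ∈ keys) :
    (pvBDict (d0 :: rest) keys).getD k 0 =
      (PySem.List.min? ((d0 :: rest).map (fun dic => pvDicGet dic k)) (fun x => x)).getD 0 := by
  unfold pvBDict
  rw [PySem.Dict.getD_eq_get?_getD, bouter_get? keys (d0 :: rest) _ k hk,
    PySem.Dict.get?_empty, ofold_eq_min?]

lemma ADict_keys (dics : List (List (String × Int))) (keys : List String) :
    (pvADict dics keys).keys = PySem.Set.update [] keys := by
  unfold pvADict
  rw [PySem.Dict.keys_foldl_insert, PySem.Dict.keys_empty]

lemma ADict_nodup (dics : List (List (String × Int))) (keys : List String) :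
    (pvADict dics keys).keys.Nodup :=
  PySem.Dict.nodup_keys_foldl_insert _ _ _ PySem.Dict.nodup_keys_empty

lemma BDict_keys (d0 : List (String × Int)) (rest : List (List (String × Int)))
    (keys : List String) :
    (pvBDict (d0 :: rest) keys).keys = PySem.Set.update [] keys := by
  unfold pvBDict
  rw [List.foldl_cons]
  have hsub : ∀ x ∈ keys, x ∈ (keys.foldl (pvBStep d0) PySem.Dict.empty).keys := by
    intro x hx
    rw [binner_keys, PySem.Dict.keys_empty]
    exact (PySem.Set.mem_update [] keys x).mpr (Or.inr hx)
  rw [bouter_keys_preserve keys rest _ hsub, binner_keys, PySem.Dict.keys_empty]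

lemma BDict_nodup (d0 : List (String × Int)) (rest : List (List (String × Int)))
    (keys : List String) : (pvBDict (d0 :: rest) keys).keys.Nodup := by
  rw [BDict_keys]
  exact PySem.Set.nodup_update [] keys List.nodup_nil

-- ===== VERDICT (by name: the statement is the Claim_ definition above) =====
theorem min_for_dic_value_spec : Claim_equal_min_for_dic_value := by
  intro dics keys _ hpre
  unfold Spec_min_for_dic_value
  obtain ⟨hp1, _⟩ := hpre
  cases dics with
  | nil =>
      have hkeys : keys = [] := hp1 rfl
      subst hkeys
      rfl
  | cons d0 rest =>
      rw [A_eq, B_eq,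
        PySem.Dict.items_eq_map_keys _ (ADict_nodup (d0 :: rest) keys) 0,
        PySem.Dict.items_eq_map_keys _ (BDict_nodup d0 rest keys) 0,
        ADict_keys, BDict_keys]
      apply List.map_congr_left
      intro k hk'
      have hk : k ∈ keys := by
        rcases (PySem.Set.mem_update [] keys k).mp hk' with h | h
        · cases h
        · exact h
      have hval : (pvADict (d0 :: rest) keys).getD k 0 = (pvBDict (d0 :: rest) keys).getD k 0 := by
        rw [ADict_getD _ _ _ hk, BDict_getD _ _ _ _ hk, gatherD_getD]
        congr 1
        apply min?_congr_mem
        · exact List.ne_nil_of_mem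
            ((mem_gathered keys (d0 :: rest) k hk (pvDicGet d0 k)).mpr
              ⟨d0, List.mem_cons_self, rfl⟩)
        · simp
        · intro x
          rw [mem_gathered keys (d0 :: rest) k hk x, List.mem_map]
          constructor
          · rintro ⟨dic, hdic, rfl⟩; exact ⟨dic, hdic, rfl⟩
          · rintro ⟨dic, hdic, rfl⟩; exact ⟨dic, hdic, rfl⟩
      rw [hval]
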